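-- pv_equiv track=rewrite | github.com/sergiosaraiva/fc-kb | md/chromadb-docker/create-business-zip.py | semantic_chunk_yaml
-- ===== SOURCE A (Python) =====
-- from typing import List, Tuple
--
-- def semantic_chunk_yaml(content: str, source_file: str) -> List[Tuple[str, str]]:
--     """Split YAML content into semantic chunks."""
--     YAML_MAX_CHUNK = 4000
--
--     def split_by_indent(lines: List[str], indent_level: int, base_idx: int, parent_key: str) -> List[Tuple[str, str, str]]:
--         indent_str = ' ' * indent_level
--         chunks = []
--         current_key = parent_key
--         current_lines = []
--         chunk_idx = base_idx
--
--         for line in lines: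
--             stripped = line.rstrip()
--             if stripped and not stripped.startswith('#'):
--                 leading_spaces = len(line) - len(line.lstrip())
--                 if leading_spaces == indent_level and ':' in stripped:
--                     if current_lines:
--                         chunk_content = '\n'.join(current_lines).strip()
--                         if chunk_content:
--                             chunks.append((chunk_content, f"{chunk_idx:03d}", current_key))
--                             chunk_idx += 1
--                     key_name = stripped.split(':')[0].strip()
--                     current_key = f"{parent_key}.{key_name}" if parent_key else key_name
--                     current_lines = [line]
--                 else:
--                     current_lines.append(line)
--             else:
--                 current_lines.append(line)
--
--         if current_lines:
--             chunk_content = '\n'.join(current_lines).strip()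
--             if chunk_content:
--                 chunks.append((chunk_content, f"{chunk_idx:03d}", current_key))
--
--         return chunks
--
--     chunks = []
--     try:
--         lines = content.split('\n')
--         first_pass = split_by_indent(lines, 0, 0, "")
--         chunk_idx = 0
--
--         for chunk_content, _, key_path in first_pass:
--             if len(chunk_content) <= YAML_MAX_CHUNK:
--                 header = f"# YAML: {source_file}\n## Section: {key_path or 'root'}\n\n"
--                 chunks.append((header + chunk_content, f"{chunk_idx:03d}"))
--                 chunk_idx += 1
--             else:
--                 chunk_lines = chunk_content.split('\n')
--                 second_pass = split_by_indent(chunk_lines, 2, chunk_idx, key_path)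
--                 for sub_content, _, sub_key in second_pass:
--                     header = f"# YAML: {source_file}\n## Section: {sub_key or key_path}\n\n"
--                     chunks.append((header + sub_content, f"{chunk_idx:03d}"))
--                     chunk_idx += 1
--
--     except Exception:
--         header = f"# YAML: {source_file}\n\n"
--         chunks.append((header + content, "000"))
--
--     if not chunks:
--         header = f"# YAML: {source_file}\n\n"
--         chunks.append((header + content, "000"))
--
--     return chunks
-- ===== SOURCE B (Python) =====
-- from typing import List, Tuple
--
-- def semantic_chunk_yaml(content: str, source_file: str) -> List[Tuple[str, str]]:
--     """Split YAML content into semantic chunks (back-to-front grouping + enumerate)."""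
--     YAML_MAX_CHUNK = 4000
--
--     def is_boundary(line: str, indent_level: int) -> bool:
--         s = line.rstrip()
--         return bool(s) and not s.startswith('#') \
--             and (len(line) - len(line.lstrip()) == indent_level) and ':' in s
--
--     def key_of(line: str, parent_key: str) -> str:
--         k = line.rstrip().split(':')[0].strip()
--         return f"{parent_key}.{k}" if parent_key else k
--
--     def segments(lines: List[str], indent_level: int, parent_key: str) -> List[Tuple[str, str]]:
--         # group lines back-to-front: a pending suffix of non-boundary lines is
--         # attached to the boundary line found to its left
--         segs: List[Tuple[List[str], str]] = []
--         acc: List[str] = []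
--         for line in reversed(lines):
--             if is_boundary(line, indent_level):
--                 segs.append(([line] + acc, key_of(line, parent_key)))
--                 acc = []
--             else:
--                 acc = [line] + acc
--         if acc:
--             segs.append((acc, parent_key))
--         segs.reverse()
--         out = []
--         for seg, key in segs:
--             text = "\n".join(seg).strip()
--             if text:
--                 out.append((text, key))
--         return out
--
--     bodies: List[Tuple[str, str]] = []
--     for text, key in segments(content.split('\n'), 0, ""):
--         if len(text) <= YAML_MAX_CHUNK:
--             bodies.append((key or 'root', text))
--         else:
--             bodies.extend((sk or key, st)
--                           for st, sk in segments(text.split('\n'), 2, key))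
--
--     if not bodies:
--         return [(f"# YAML: {source_file}\n\n{content}", "000")]
--     return [(f"# YAML: {source_file}\n## Section: {name}\n\n{text}", f"{i:03d}")
--             for i, (name, text) in enumerate(bodies)]
-- ===== Notes on version B (the rewrite author's own statement) =====
-- stated objective: alternative
-- what changed: B replaces A's stateful forward fold (current_key/current_lines/chunk_idx with duplicated flush logic) by a back-to-front grouping pass over reversed(lines), a flatMap building keyed (name, text) bodies, and chunk numbering attached at the end via enumerate, dropping A's unreachable try/except and the unused formatted-index field.
import Mathlib
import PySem

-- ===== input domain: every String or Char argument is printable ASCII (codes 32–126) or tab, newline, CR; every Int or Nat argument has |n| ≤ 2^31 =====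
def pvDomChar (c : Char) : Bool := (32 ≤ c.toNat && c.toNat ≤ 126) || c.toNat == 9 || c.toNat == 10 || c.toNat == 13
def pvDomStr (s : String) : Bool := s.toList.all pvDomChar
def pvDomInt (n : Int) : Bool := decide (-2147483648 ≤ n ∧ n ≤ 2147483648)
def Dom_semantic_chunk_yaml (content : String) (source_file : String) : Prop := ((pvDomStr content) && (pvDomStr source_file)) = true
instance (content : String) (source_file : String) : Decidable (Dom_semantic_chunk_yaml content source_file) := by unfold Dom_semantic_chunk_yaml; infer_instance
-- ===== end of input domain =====

-- B replaces A's stateful forward fold by back-to-front segment grouping, a flatMap of keyed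
-- bodies and index numbering via enumerate at the end; objective: alternative, same cost.


-- ===== PORT A =====
-- f"{idx:03d}" for idx ≥ 0 is str(idx).zfill(3)
def pvA_fmt3 (idx : Nat) : List Char := PySem.Chars.zfill (PySem.Int.toChars idx) 3

def pvA_header (sf name : List Char) : List Char :=
  "# YAML: ".toList ++ sf ++ "\n## Section: ".toList ++ name ++ "\n\n".toList

-- the inner 'for line in lines' loop of split_by_indent, plus the final flush;
-- state = (chunks, current_key, current_lines, chunk_idx), lines consumed structurally
def pvA_splitLoop (indent : Nat) (parent : List Char) :
    List (List Char) → List (List Char × List Char × List Char) → List Char →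
    List (List Char) → Nat → List (List Char × List Char × List Char)
  | [], chunks, key, cur, idx =>
      if !cur.isEmpty then
        let t := PySem.Chars.strip (PySem.Chars.join ['\n'] cur)
        if !t.isEmpty then chunks ++ [(t, pvA_fmt3 idx, key)] else chunks
      else chunks
  | l :: ls, chunks, key, cur, idx =>
      let stripped := PySem.Chars.rstrip l
      if !stripped.isEmpty && !PySem.Chars.startswith stripped ['#'] then
        -- leading_spaces = len(line) - len(line.lstrip())
        if (l.length - (PySem.Chars.lstrip l).length == indent) && PySem.Chars.isIn [':'] stripped then
          let st :=
            if !cur.isEmpty then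
              let t := PySem.Chars.strip (PySem.Chars.join ['\n'] cur)
              if !t.isEmpty then (chunks ++ [(t, pvA_fmt3 idx, key)], idx + 1) else (chunks, idx)
            else (chunks, idx)
          -- key_name = stripped.split(':')[0].strip(); split on a nonempty sep never returns [], [0] = headD
          let keyName := PySem.Chars.strip ((PySem.Chars.splitOn stripped [':']).headD [])
          let key' := if !parent.isEmpty then parent ++ '.' :: keyName else keyName
          pvA_splitLoop indent parent ls st.1 key' [l] st.2
        else pvA_splitLoop indent parent ls chunks key (cur ++ [l]) idx
      else pvA_splitLoop indent parent ls chunks key (cur ++ [l]) idx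

-- split_by_indent(lines, indent, base, parent)
def pvA_split (lines : List (List Char)) (indent : Nat) (base : Nat) (parent : List Char) :
    List (List Char × List Char × List Char) :=
  pvA_splitLoop indent parent lines [] parent [] base

-- inner 'for sub_content, _, sub_key in second_pass' loop
def pvA_inner (sf k : List Char) :
    List (List Char × List Char × List Char) → List (List Char × List Char) → Nat →
    List (List Char × List Char) × Nat
  | [], chunks, idx => (chunks, idx)
  | (sc, _, sk) :: rest, chunks, idx =>
      pvA_inner sf k rest
        (chunks ++ [(pvA_header sf (if sk.isEmpty then k else sk) ++ sc, pvA_fmt3 idx)]) (idx + 1)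

-- outer 'for chunk_content, _, key_path in first_pass' loop
def pvA_outer (sf : List Char) :
    List (List Char × List Char × List Char) → List (List Char × List Char) → Nat →
    List (List Char × List Char)
  | [], chunks, _ => chunks
  | (c, _, k) :: rest, chunks, idx =>
      if c.length ≤ 4000 then
        pvA_outer sf rest
          (chunks ++ [(pvA_header sf (if k.isEmpty then "root".toList else k) ++ c, pvA_fmt3 idx)]) (idx + 1)
      else
        let second := pvA_split (PySem.Chars.splitOn c ['\n']) 2 idx k
        let st := pvA_inner sf k second chunks idx
        pvA_outer sf rest st.1 st.2

-- the try: body contains only split/join/strip/format operations, none of which can raise,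
-- so the except branch is unreachable and is not ported
def semantic_chunk_yaml (content : String) (source_file : String) : List (String × String) :=
  let lines := PySem.Chars.splitOn content.toList ['\n']
  let first := pvA_split lines 0 0 []
  let chunks := pvA_outer source_file.toList first [] 0
  let chunks :=
    if chunks.isEmpty then
      [("# YAML: ".toList ++ source_file.toList ++ "\n\n".toList ++ content.toList, "000".toList)]
    else chunks
  chunks.map (fun p => (String.ofList p.1, String.ofList p.2))

-- ===== PORT B =====
def pvB_fmt3 (idx : Nat) : List Char := PySem.Chars.zfill (PySem.Int.toChars idx) 3

def pvB_header (sf name : List Char) : List Char :=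
  "# YAML: ".toList ++ sf ++ "\n## Section: ".toList ++ name ++ "\n\n".toList

def pvB_isBoundary (indent : Nat) (l : List Char) : Bool :=
  let s := PySem.Chars.rstrip l
  !s.isEmpty && !PySem.Chars.startswith s ['#'] &&
    (l.length - (PySem.Chars.lstrip l).length == indent) && PySem.Chars.isIn [':'] s

def pvB_keyOf (parent l : List Char) : List Char :=
  let k := PySem.Chars.strip ((PySem.Chars.splitOn (PySem.Chars.rstrip l) [':']).headD [])
  if !parent.isEmpty then parent ++ '.' :: k else k

-- the reversed-iteration grouping loop of Source B: consuming 'reversed(lines)' with state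
-- (segs, acc), i.e. a right fold over lines (segs kept front-first, as segs.reverse() yields)
def pvB_collect (indent : Nat) (parent : List Char) :
    List (List Char) → List (List (List Char) × List Char) × List (List Char)
  | [] => ([], [])
  | l :: ls =>
      let st := pvB_collect indent parent ls
      if pvB_isBoundary indent l then ((l :: st.2, pvB_keyOf parent l) :: st.1, [])
      else (st.1, l :: st.2)

def pvB_keep (g : List (List Char) × List Char) : Option (List Char × List Char) :=
  let t := PySem.Chars.strip (PySem.Chars.join ['\n'] g.1)
  if !t.isEmpty then some (t, g.2) else none

def pvB_segments (indent : Nat) (parent : List Char) (lines : List (List Char)) :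
    List (List Char × List Char) :=
  let st := pvB_collect indent parent lines
  ((if !st.2.isEmpty then [(st.2, parent)] else []) ++ st.1).filterMap pvB_keep

-- the bodies loop: each first-pass segment contributes one (name, text) pair or,
-- when oversized, the list of its second-pass pairs
def pvB_bodies (seg : List (List Char × List Char)) : List (List Char × List Char) :=
  seg.flatMap (fun p =>
    if p.1.length ≤ 4000 then [((if p.2.isEmpty then "root".toList else p.2), p.1)]
    else (pvB_segments 2 p.2 (PySem.Chars.splitOn p.1 ['\n'])).map
      (fun q => ((if q.2.isEmpty then p.2 else q.2), q.1)))

def semantic_chunk_yaml_alt (content : String) (source_file : String) : List (String × String) :=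
  let bodies := pvB_bodies (pvB_segments 0 [] (PySem.Chars.splitOn content.toList ['\n']))
  if bodies.isEmpty then
    [(String.ofList ("# YAML: ".toList ++ source_file.toList ++ "\n\n".toList ++ content.toList),
      "000")]
  else
    bodies.zipIdx.map (fun p =>
      (String.ofList (pvB_header source_file.toList p.1.1 ++ p.1.2), String.ofList (pvB_fmt3 p.2)))

-- ===== PRECONDITION & SPEC =====
def Spec_semantic_chunk_yaml (content : String) (source_file : String) (out : List (String × String)) : Prop := out = semantic_chunk_yaml_alt content source_file
instance (content : String) (source_file : String) (out : List (String × String)) : Decidable (Spec_semantic_chunk_yaml content source_file out) := by unfold Spec_semantic_chunk_yaml; infer_instance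

-- ===== CLAIM (what is proved, stated in full; the proofs are below) =====
def Claim_equal_semantic_chunk_yaml : Prop := ∀ (content : String) (source_file : String), Dom_semantic_chunk_yaml content source_file → Spec_semantic_chunk_yaml content source_file (semantic_chunk_yaml content source_file)

-- ===== LEMMAS AND PROOFS =====

-- projection dropping A's (unused) formatted index component
def pvProj (xs : List (List Char × List Char × List Char)) : List (List Char × List Char) :=
  xs.map (fun x => (x.1, x.2.2))

def pvFlushOpt (key : List Char) (cur : List (List Char)) : List (List Char × List Char) :=
  let t := PySem.Chars.strip (PySem.Chars.join ['\n'] cur)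
  if !t.isEmpty then [(t, key)] else []

-- A's loop, with the index dropped, one line at a time
def pvEmit (indent : Nat) (parent : List Char) (key : List Char) (cur : List (List Char)) :
    List (List Char) → List (List Char × List Char)
  | [] => pvFlushOpt key cur
  | l :: ls =>
      if pvB_isBoundary indent l then
        pvFlushOpt key cur ++ pvEmit indent parent (pvB_keyOf parent l) [l] ls
      else pvEmit indent parent key (cur ++ [l]) ls

theorem pvFlushOpt_nil (key : List Char) : pvFlushOpt key [] = [] := rfl

theorem pvFlushProj (chunks : List (List Char × List Char × List Char)) (key f : List Char)
    (cur : List (List Char)) :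
    pvProj (if !cur.isEmpty then
              (if !(PySem.Chars.strip (PySem.Chars.join ['\n'] cur)).isEmpty then
                chunks ++ [(PySem.Chars.strip (PySem.Chars.join ['\n'] cur), f, key)] else chunks)
            else chunks) = pvProj chunks ++ pvFlushOpt key cur := by
  by_cases hc : cur.isEmpty
  · rw [List.isEmpty_iff.mp hc, pvFlushOpt_nil]; simp
  · simp only [hc, Bool.not_false, if_true, pvFlushOpt]
    split_ifs with ht
    · simp [pvProj]
    · simp

theorem pvL1 (indent : Nat) (parent : List Char) (lines : List (List Char))
    (chunks : List (List Char × List Char × List Char)) (key : List Char)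
    (cur : List (List Char)) (idx : Nat) :
    pvProj (pvA_splitLoop indent parent lines chunks key cur idx) =
      pvProj chunks ++ pvEmit indent parent key cur lines := by
  induction lines generalizing chunks key cur idx with
  | nil => exact pvFlushProj chunks key (pvA_fmt3 idx) cur
  | cons l ls ih =>
    simp only [pvA_splitLoop, pvEmit]
    by_cases h1 : (!(PySem.Chars.rstrip l).isEmpty && !PySem.Chars.startswith (PySem.Chars.rstrip l) ['#']) = true
    · by_cases h2 : ((l.length - (PySem.Chars.lstrip l).length == indent) && PySem.Chars.isIn [':'] (PySem.Chars.rstrip l)) = true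
      · have hb : pvB_isBoundary indent l = true := by
          unfold pvB_isBoundary
          simp only [Bool.and_eq_true] at h1 h2 ⊢
          tauto
        simp only [h1, h2, hb, if_true, ih, pvB_keyOf]
        by_cases hc : cur.isEmpty
        · rw [List.isEmpty_iff.mp hc, pvFlushOpt_nil]
          simp
        · by_cases ht : (PySem.Chars.strip (PySem.Chars.join ['\n'] cur)).isEmpty
          · simp [pvProj, pvFlushOpt, hc, ht]
          · simp [pvProj, pvFlushOpt, hc, ht, List.append_assoc]
      · have hb : pvB_isBoundary indent l = false := by
          unfold pvB_isBoundary
          rw [Bool.eq_false_iff]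
          intro hcon
          simp only [Bool.and_eq_true] at hcon h2
          tauto
        simp only [h1, h2, if_true, if_false, hb, Bool.false_eq_true, ih]
    · have hb : pvB_isBoundary indent l = false := by
        unfold pvB_isBoundary
        rw [Bool.eq_false_iff]
        intro hcon
        simp only [Bool.and_eq_true] at hcon h1
        tauto
      simp only [h1, if_false, hb, Bool.false_eq_true, ih]

theorem pvKeep_cons (seg : List (List Char)) (k : List Char)
    (rest : List (List (List Char) × List Char)) :
    List.filterMap pvB_keep ((seg, k) :: rest) = pvFlushOpt k seg ++ rest.filterMap pvB_keep := by
  simp only [List.filterMap_cons, pvB_keep, pvFlushOpt]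
  split_ifs <;> simp

-- A's emission equals B's back-to-front grouping followed by the keep filter
theorem pvL2 (indent : Nat) (parent key : List Char) (cur : List (List Char))
    (lines : List (List Char)) :
    pvEmit indent parent key cur lines =
      pvFlushOpt key (cur ++ (pvB_collect indent parent lines).2) ++
        (pvB_collect indent parent lines).1.filterMap pvB_keep := by
  induction lines generalizing key cur with
  | nil => simp [pvEmit, pvB_collect]
  | cons l ls ih =>
    by_cases hb : pvB_isBoundary indent l = true
    · simp only [pvEmit, hb, if_true, ih, pvB_collect]
      rw [pvKeep_cons]
      simp
    · simp only [Bool.not_eq_true] at hb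
      simp only [pvEmit, hb, Bool.false_eq_true, if_false, ih, pvB_collect,
        List.append_assoc, List.cons_append, List.nil_append]

theorem pvSplit_eq (indent : Nat) (parent : List Char) (base : Nat) (lines : List (List Char)) :
    pvProj (pvA_split lines indent base parent) = pvB_segments indent parent lines := by
  unfold pvA_split pvB_segments
  rw [pvL1, pvL2]
  simp only [pvProj, List.map_nil, List.nil_append, List.filterMap_append, List.nil_append]
  congr 1
  by_cases h : (pvB_collect indent parent lines).2.isEmpty
  · rw [List.isEmpty_iff.mp h]
    simp [pvFlushOpt_nil]
  · simp [h, pvKeep_cons]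

theorem pvAB_header : pvA_header = pvB_header := rfl
theorem pvAB_fmt3 : pvA_fmt3 = pvB_fmt3 := rfl

def pvRender (sf : List Char) (p : (List Char × List Char) × Nat) : List Char × List Char :=
  (pvB_header sf p.1.1 ++ p.1.2, pvB_fmt3 p.2)

theorem pvInner_eq (sf k : List Char) (xs : List (List Char × List Char × List Char))
    (chunks : List (List Char × List Char)) (idx : Nat) :
    pvA_inner sf k xs chunks idx =
      (chunks ++ (((pvProj xs).map (fun q => ((if q.2.isEmpty then k else q.2), q.1))).zipIdx idx).map (pvRender sf),
       idx + xs.length) := by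
  induction xs generalizing chunks idx with
  | nil => simp [pvA_inner, pvProj]
  | cons x rest ih =>
    obtain ⟨sc, f, sk⟩ := x
    simp only [pvA_inner, pvProj, List.map_cons, List.zipIdx_cons, pvAB_header, pvAB_fmt3, ih,
      List.map_cons, List.append_assoc, List.cons_append, List.nil_append, List.length_cons,
      pvRender]
    congr 1
    omega

theorem pvOuter_eq (sf : List Char) (xs : List (List Char × List Char × List Char))
    (chunks : List (List Char × List Char)) (idx : Nat) :
    pvA_outer sf xs chunks idx =
      chunks ++ ((pvB_bodies (pvProj xs)).zipIdx idx).map (pvRender sf) := by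
  induction xs generalizing chunks idx with
  | nil => simp [pvA_outer, pvB_bodies, pvProj]
  | cons x rest ih =>
    obtain ⟨c, f, k⟩ := x
    simp only [pvA_outer, pvProj, List.map_cons, pvB_bodies, List.flatMap_cons]
    by_cases hlen : c.length ≤ 4000
    · simp only [hlen, if_true, ih, pvAB_header, pvAB_fmt3]
      rw [List.zipIdx_append, List.map_append]
      simp only [List.length_cons, List.length_nil, List.zipIdx_cons, List.zipIdx_nil,
        List.map_cons, List.map_nil, List.append_assoc, List.cons_append, List.nil_append,
        pvRender]
      rfl
    · simp only [hlen, if_false]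
      rw [pvInner_eq, ih, List.zipIdx_append, List.map_append, List.append_assoc]
      rw [← pvSplit_eq (lines := PySem.Chars.splitOn c ['\n']) (base := idx) (indent := 2) (parent := k)]
      simp [pvB_bodies, pvProj]
  
-- ===== VERDICT (by name: the statement is the Claim_ definition above) =====
theorem semantic_chunk_yaml_spec : Claim_equal_semantic_chunk_yaml := by
  intro content source_file _
  unfold Spec_semantic_chunk_yaml semantic_chunk_yaml semantic_chunk_yaml_alt
  dsimp only
  rw [pvOuter_eq, pvSplit_eq]
  have hlen : ((pvB_bodies (pvB_segments 0 [] (PySem.Chars.splitOn content.toList ['\n']))).zipIdx.map (pvRender source_file.toList)).isEmpty = (pvB_bodies (pvB_segments 0 [] (PySem.Chars.splitOn content.toList ['\n']))).isEmpty := by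
    cases pvB_bodies (pvB_segments 0 [] (PySem.Chars.splitOn content.toList ['\n'])) <;> rfl
  by_cases h : (pvB_bodies (pvB_segments 0 [] (PySem.Chars.splitOn content.toList ['\n']))).isEmpty
  · rw [List.isEmpty_iff.mp h]
    simp
  · simp only [List.nil_append, hlen, h, Bool.false_eq_true, if_false, List.map_map]
    exact List.map_congr_left (fun p _ => rfl)
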